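-- pv_equiv track=rewrite | github.com/tjfisher22/AdventOfCode2022 | Day1/day_1.py | max_calorie_elf
-- ===== SOURCE A (Python) =====
-- def calorie_count(elf):
--     total = 0
--     calories = elf.split('\n')
--     for x in calories:
--         total += int(x)
--     return total
--
-- def max_calorie_elf(list):
--     max_elf = 0
--     max_calorie = 0
--     elves = list.split('\n\n')
--     for i, x in enumerate(elves):
--         if calorie_count(x) > max_calorie:
--             max_calorie = calorie_count(x)
--             max_elf = i + 1
--     elf_and_pos = [max_elf,max_calorie]
--     return elf_and_pos
-- ===== SOURCE B (Python) =====
-- def max_calorie_elf(list):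
--     ranking = sorted(
--         ((i, sum(int(x) for x in block.split('\n')))
--          for i, block in enumerate(list.split('\n\n'), 1)),
--         key=lambda p: (-p[1], p[0]))
--     pos, best = ranking[0]
--     return [pos, best]
-- ===== Notes on version B (the rewrite author's own statement) =====
-- stated objective: alternative
-- what changed: B builds a (position, total) ranking table and sorts it by (-total, position), returning the top entry, instead of A's single running-max tracking loop that recomputes each block's sum twice.
-- intended difference: On inputs where every elf's calorie total is at most zero, A returns [0, 0] because its strict comparison against an initial max of 0 never fires, while B returns the first maximal elf's 1-based position together with that total, the intended result of a maximum query. — e.g. on max_calorie_elf("0"): A returns [0, 0], B returns [1, 0]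
import Mathlib
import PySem

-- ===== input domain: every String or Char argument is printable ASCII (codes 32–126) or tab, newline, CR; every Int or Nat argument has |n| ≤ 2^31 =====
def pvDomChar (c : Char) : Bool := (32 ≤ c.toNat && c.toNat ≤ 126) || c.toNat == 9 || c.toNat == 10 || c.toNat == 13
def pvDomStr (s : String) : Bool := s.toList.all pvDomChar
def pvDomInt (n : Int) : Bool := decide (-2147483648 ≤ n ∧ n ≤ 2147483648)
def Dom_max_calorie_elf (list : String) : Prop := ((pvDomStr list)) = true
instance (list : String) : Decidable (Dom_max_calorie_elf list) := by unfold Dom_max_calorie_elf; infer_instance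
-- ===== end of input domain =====

-- B ranks (position, total) pairs by sorting on (-total, position) and takes the top entry,
-- instead of A's running-max tracking loop; on all-nonpositive totals B reports the real
-- first-maximal elf where A's strict '>' against 0 leaves [0, 0] (see D_ below).

-- ===== PORT A =====
-- calorie_count: total = 0; for x in elf.split('\n'): total += int(x)
-- int(x) is PySem.Int.ofChars?; inputs where it is none (ValueError) are excluded by Pre_.
def calorie_count (elf : List Char) : Int :=
  (PySem.Chars.splitOn elf ['\n']).foldl
    (fun total x => total + (PySem.Int.ofChars? x).getD 0) 0

def max_calorie_elf (list : String) : List Int :=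
  let elves := PySem.Chars.splitOn list.toList ['\n', '\n']
  let st := (PySem.List.enumerate elves).foldl
    (fun (st : Int × Int) ix =>
      if calorie_count ix.2 > st.2 then (ix.1 + 1, calorie_count ix.2) else st)
    (0, 0)
  [st.1, st.2]

-- ===== PORT B =====
-- per-elf total: sum(int(x) for x in block.split('\n'))
def elf_total (block : List Char) : Int :=
  ((PySem.Chars.splitOn block ['\n']).map (fun x => (PySem.Int.ofChars? x).getD 0)).sum

-- ranking = sorted(((i, total) for i, block in enumerate(blocks, 1)), key=lambda p: (-p[1], p[0]));
-- return list of ranking[0]'s components ([0] can only raise on an empty ranking, which split never yields)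
def max_calorie_elf_alt (list : String) : List Int :=
  let pairs := (PySem.List.enumerate (PySem.Chars.splitOn list.toList ['\n', '\n']) 1).map
      (fun ix => (ix.1, elf_total ix.2))
  let ranking := PySem.List.sorted2 pairs (fun p => -p.2) (fun p => p.1)
  match ranking with
  | [] => []
  | p :: _ => [p.1, p.2]

-- ===== PRECONDITION & SPEC =====
-- Pre_ excludes exactly the inputs where some line is not int-parsable, on which A raises ValueError.
def Pre_max_calorie_elf (list : String) : Prop :=
  ∀ b ∈ PySem.Chars.splitOn list.toList ['\n', '\n'],
    ∀ x ∈ PySem.Chars.splitOn b ['\n'], (PySem.Int.ofChars? x).isSome = true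
instance (list : String) : Decidable (Pre_max_calorie_elf list) := by
  unfold Pre_max_calorie_elf; infer_instance

def pvWitness_max_calorie_elf : String := "1\n2\n\n3"

-- On inputs where every elf's calorie total is at most zero, A returns [0, 0] (its strict
-- comparison against an initial max of 0 never fires) while B returns the first maximal elf's
-- 1-based position together with that total, the intended result of a maximum query.
def D_max_calorie_elf (list : String) : Prop :=
  ∀ b ∈ PySem.Chars.splitOn list.toList ['\n', '\n'],
    (PySem.Chars.splitOn b ['\n']).foldr
      (fun ln acc => acc + (PySem.Int.ofChars? ln).getD 0) 0 ≤ 0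
instance (list : String) : Decidable (D_max_calorie_elf list) := by
  unfold D_max_calorie_elf; infer_instance

def Spec_max_calorie_elf (list : String) (out : List Int) : Prop :=
  ¬ D_max_calorie_elf list → out = max_calorie_elf_alt list
instance (list : String) (out : List Int) : Decidable (Spec_max_calorie_elf list out) := by
  unfold Spec_max_calorie_elf; infer_instance

def pvDiffWitness_max_calorie_elf : String := "0"
def pvDiffWitnessOut_max_calorie_elf : (List Int) × (List Int) := ([0, 0], [1, 0])

-- ===== CLAIM (what is proved, stated in full; the proofs are below) =====
def Claim_unchanged_max_calorie_elf : Prop := ∀ (list : String), Dom_max_calorie_elf list → Pre_max_calorie_elf list → Spec_max_calorie_elf list (max_calorie_elf list)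
def Claim_changed_max_calorie_elf : Prop := Dom_max_calorie_elf (pvDiffWitness_max_calorie_elf) ∧ Pre_max_calorie_elf (pvDiffWitness_max_calorie_elf) ∧ D_max_calorie_elf (pvDiffWitness_max_calorie_elf) ∧ max_calorie_elf (pvDiffWitness_max_calorie_elf) = pvDiffWitnessOut_max_calorie_elf.1 ∧ max_calorie_elf_alt (pvDiffWitness_max_calorie_elf) = pvDiffWitnessOut_max_calorie_elf.2 ∧ pvDiffWitnessOut_max_calorie_elf.1 ≠ pvDiffWitnessOut_max_calorie_elf.2
def Claim_exact_max_calorie_elf : Prop := ∀ (list : String), Dom_max_calorie_elf list → Pre_max_calorie_elf list → D_max_calorie_elf list → max_calorie_elf list ≠ max_calorie_elf_alt list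

-- ===== LEMMAS AND PROOFS =====

-- the change region's per-block bound is exactly the per-elf total
lemma foldr_total_eq (b : List Char) :
    (PySem.Chars.splitOn b ['\n']).foldr
      (fun ln acc => acc + (PySem.Int.ofChars? ln).getD 0) 0 = elf_total b := by
  unfold elf_total
  generalize PySem.Chars.splitOn b ['\n'] = l
  induction l with
  | nil => rfl
  | cons x xs ih => simp [ih]; ring

-- folding max over a list pulls an outer max out of the accumulator
lemma foldl_max_init (l : List Int) (a b : Int) :
    l.foldl max (max a b) = max a (l.foldl max b) := by
  induction l generalizing b with
  | nil => rfl
  | cons x xs ih =>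
      simp only [List.foldl_cons]
      rw [max_assoc, ih]

lemma foldl_max_mem (l : List Int) (a : Int) : l.foldl max a ∈ a :: l := by
  induction l generalizing a with
  | nil => simp
  | cons x xs ih =>
      simp only [List.foldl_cons]
      rw [foldl_max_init]
      rcases le_total a (xs.foldl max x) with h | h
      · rw [max_eq_right h]
        exact List.mem_cons_of_mem _ (ih x)
      · rw [max_eq_left h]
        exact List.mem_cons_self ..

-- A's running-max loop over (index, total) pairs finds the first maximum and its index.
lemma loop_spec (rest : List Int) (t k me mc : Int) :
    (PySem.List.enumerate (t :: rest) k).foldl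
      (fun (st : Int × Int) ix => if ix.2 > st.2 then (ix.1 + 1, ix.2) else st) (me, mc)
    = (if mc < rest.foldl max t
        then (k + ((PySem.List.index? (t :: rest) (rest.foldl max t)).getD 0 : Nat) + 1,
              rest.foldl max t)
        else (me, mc)) := by
  induction rest generalizing t k me mc with
  | nil =>
      by_cases h : mc < t <;>
        simp [PySem.List.enumerate_cons, PySem.List.enumerate_nil, h]
  | cons r rs ih =>
      have hM : (r :: rs).foldl max t = max t (rs.foldl max r) := by
        simp only [List.foldl_cons]; rw [foldl_max_init]
      set M := rs.foldl max r with hMdef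
      obtain ⟨n, hn⟩ : ∃ n, PySem.List.index? (r :: rs) M = some n := by
        rw [← Option.isSome_iff_exists, PySem.List.index?_isSome_iff]
        exact foldl_max_mem rs r
      rw [PySem.List.enumerate_cons, List.foldl_cons, hM]
      by_cases ht : mc < t
      · rw [if_pos (show (k, t).2 > (me, mc).2 from ht)]
        rw [ih r (k + 1) (k + 1) t]
        by_cases hr : t < M
        · have hmax : max t M = M := max_eq_right (le_of_lt hr)
          have hidx : PySem.List.index? (t :: r :: rs) M = some (n + 1) := by
            rw [PySem.List.index?_cons_of_ne _ (ne_of_lt hr), hn]; rfl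
          rw [if_pos hr, hmax, if_pos (lt_trans ht hr), hidx, hn]
          simp only [Option.getD_some, Prod.mk.injEq]
          constructor
          · push_cast; ring
          · trivial
        · have hmax : max t M = t := max_eq_left (le_of_not_gt hr)
          rw [if_neg hr, hmax, if_pos ht, PySem.List.index?_cons_self]
          simp only [Option.getD_some, Nat.cast_zero, Prod.mk.injEq]
          constructor
          · ring
          · trivial
      · rw [if_neg (show ¬ (k, t).2 > (me, mc).2 from ht)]
        rw [ih r (k + 1) me mc]
        by_cases hmc : mc < M
        · have hle : t ≤ mc := le_of_not_gt ht
          have htM : t < M := lt_of_le_of_lt hle hmc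
          have hmax : max t M = M := max_eq_right (le_of_lt htM)
          have hidx : PySem.List.index? (t :: r :: rs) M = some (n + 1) := by
            rw [PySem.List.index?_cons_of_ne _ (ne_of_lt htM), hn]; rfl
          rw [if_pos hmc, hmax, if_pos hmc, hidx, hn]
          simp only [Option.getD_some, Prod.mk.injEq]
          constructor
          · push_cast; ring
          · trivial
        · have : ¬ mc < max t M := by
            rw [not_lt] at ht hmc ⊢
            exact max_le ht hmc
          rw [if_neg hmc, if_neg this]

-- the loop over blocks with calorie_count is the loop over the list of totals
lemma enumerate_map_foldl (l : List (List Char)) (k : Int) (s : Int × Int) :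
    (PySem.List.enumerate l k).foldl
      (fun (st : Int × Int) ix =>
        if calorie_count ix.2 > st.2 then (ix.1 + 1, calorie_count ix.2) else st) s
    = (PySem.List.enumerate (l.map calorie_count) k).foldl
      (fun (st : Int × Int) ix => if ix.2 > st.2 then (ix.1 + 1, ix.2) else st) s := by
  induction l generalizing k s with
  | nil => rfl
  | cons x xs ih => simp [PySem.List.enumerate_cons, ih]

lemma calorie_count_eq (b : List Char) : calorie_count b = elf_total b := by
  unfold calorie_count elf_total
  rw [PySem.List.foldl_add]
  simp

-- B-side: pairing an enumerate with a mapped value commutes with mapping first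
lemma enumerate_map_pairs (l : List (List Char)) (k : Int) :
    (PySem.List.enumerate l k).map (fun ix => (ix.1, elf_total ix.2))
    = PySem.List.enumerate (l.map elf_total) k := by
  induction l generalizing k with
  | nil => rfl
  | cons x xs ih => simp [PySem.List.enumerate_cons, ih]

-- head of the insertion fold: only an element 'before' the current head replaces the head
lemma head_foldl_insertBy {α : Type} (before : α → α → Bool) (l : List α) :
    ∀ (y : α) (ys : List α) (d : α),
    (l.foldl (fun acc x => PySem.List.insertBy before x acc) (y :: ys)).headD d
    = l.foldl (fun m x => if before x m then x else m) y := by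
  induction l with
  | nil => intro y ys d; rfl
  | cons x xs ih =>
      intro y ys d
      simp only [List.foldl_cons, PySem.List.insertBy]
      by_cases h : before x y = true
      · simp only [h, if_true, if_pos h]
        exact ih x (y :: ys) d
      · simp only [h, if_false, if_neg h]
        exact ih y _ d

-- B's running lex-min over enumerate pairs (indices strictly above the accumulator's)
-- is the first-argmax loop.
lemma loop_specB (l : List Int) :
    ∀ (k j tm : Int), j < k →
    (PySem.List.enumerate l k).foldl
      (fun (m : Int × Int) x =>
        if (decide (-x.2 < -m.2) || !decide (-m.2 < -x.2) && decide (x.1 < m.1)) = true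
        then x else m) (j, tm)
    = (if tm < l.foldl max tm
        then (k + ((PySem.List.index? l (l.foldl max tm)).getD 0 : Nat), l.foldl max tm)
        else (j, tm)) := by
  induction l with
  | nil =>
      intro k j tm _
      simp [PySem.List.enumerate_nil]
  | cons r rs ih =>
      intro k j tm hjk
      have hM : (r :: rs).foldl max tm = rs.foldl max (max tm r) := by
        simp only [List.foldl_cons]
      rw [PySem.List.enumerate_cons, List.foldl_cons]
      have hkj : decide ((k : Int) < j) = false := by
        simp only [decide_eq_false_iff_not, not_lt]; omega
      by_cases htr : tm < r
      · have hcond : (decide (-(k, r).2 < -(j, tm).2)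
            || !decide (-(j, tm).2 < -(k, r).2) && decide ((k, r).1 < (j, tm).1)) = true := by
          simp only [decide_eq_true_eq, Bool.or_eq_true]
          left; omega
        rw [if_pos hcond, ih (k + 1) k r (by omega)]
        have hmax : max tm r = r := max_eq_right (le_of_lt htr)
        rw [hM, hmax]
        set M := rs.foldl max r with hMdef
        have hrM : r ≤ M := (PySem.List.le_foldl_max rs r).1
        by_cases hr : r < M
        · obtain ⟨n, hn⟩ : ∃ n, PySem.List.index? rs M = some n := by
            rw [← Option.isSome_iff_exists, PySem.List.index?_isSome_iff]
            rcases List.mem_cons.mp (foldl_max_mem rs r) with h | h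
            · exact absurd h.symm (ne_of_lt hr)
            · exact h
          have hidx : PySem.List.index? (r :: rs) M = some (n + 1) := by
            rw [PySem.List.index?_cons_of_ne _ (ne_of_lt hr), hn]; rfl
          rw [if_pos hr, if_pos (lt_trans htr hr), hidx, hn]
          simp only [Option.getD_some, Prod.mk.injEq]
          constructor
          · push_cast; ring
          · trivial
        · have hMr : M = r := le_antisymm (le_of_not_gt hr) hrM
          rw [if_neg hr, if_pos (hMr ▸ htr), hMr, PySem.List.index?_cons_self]
          simp only [Option.getD_some, Nat.cast_zero, Prod.mk.injEq]
          constructor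
          · ring
          · trivial
      · have hcond : (decide (-(k, r).2 < -(j, tm).2)
            || !decide (-(j, tm).2 < -(k, r).2) && decide ((k, r).1 < (j, tm).1)) = true
            → False := by
          simp only [decide_eq_true_eq, Bool.or_eq_true, Bool.and_eq_true, Bool.not_eq_true',
            decide_eq_false_iff_not]
          rintro (h | ⟨_, h⟩) <;> omega
        rw [if_neg hcond, ih (k + 1) j tm (by omega)]
        have hmax : max tm r = tm := max_eq_left (le_of_not_gt htr)
        rw [hM, hmax]
        set M := rs.foldl max tm with hMdef
        by_cases hmc : tm < M
        · obtain ⟨n, hn⟩ : ∃ n, PySem.List.index? rs M = some n := by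
            rw [← Option.isSome_iff_exists, PySem.List.index?_isSome_iff]
            rcases List.mem_cons.mp (foldl_max_mem rs tm) with h | h
            · exact absurd h.symm (ne_of_lt hmc)
            · exact h
          have hrM : r < M := lt_of_le_of_lt (le_of_not_gt htr) hmc
          have hidx : PySem.List.index? (r :: rs) M = some (n + 1) := by
            rw [PySem.List.index?_cons_of_ne _ (ne_of_lt hrM), hn]; rfl
          rw [if_pos hmc, if_pos hmc, hidx, hn]
          simp only [Option.getD_some, Prod.mk.injEq]
          constructor
          · push_cast; ring
          · trivial
        · rw [if_neg hmc, if_neg hmc]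

-- B's whole computation on the totals list t :: rest
lemma alt_char (list : String) (t : Int) (rest : List Int)
    (h : (PySem.Chars.splitOn list.toList ['\n', '\n']).map elf_total = t :: rest) :
    max_calorie_elf_alt list
    = (if t < rest.foldl max t
        then [(2 : Int) + ((PySem.List.index? rest (rest.foldl max t)).getD 0 : Nat), rest.foldl max t]
        else [1, t]) := by
  unfold max_calorie_elf_alt
  rw [enumerate_map_pairs, h]
  simp only [PySem.List.sorted2, PySem.List.enumerate_cons, List.foldl_cons,
    Bool.false_eq_true, if_false]
  rw [show (1 : Int) + 1 = 2 from rfl]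
  have hins : PySem.List.insertBy
      (fun a b : Int × Int => decide (-a.2 < -b.2) || !decide (-b.2 < -a.2) && decide (a.1 < b.1))
      ((1 : Int), t) [] = [((1 : Int), t)] := rfl
  rw [hins]
  have hhead := head_foldl_insertBy
    (fun a b : Int × Int => decide (-a.2 < -b.2) || !decide (-b.2 < -a.2) && decide (a.1 < b.1))
    (PySem.List.enumerate rest 2) ((1 : Int), t) [] ((0 : Int), 0)
  have hfold := loop_specB rest 2 1 t (by omega)
  cases hres : (PySem.List.enumerate rest 2).foldl
      (fun acc x => PySem.List.insertBy
        (fun a b : Int × Int => decide (-a.2 < -b.2) || !decide (-b.2 < -a.2) && decide (a.1 < b.1))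
        x acc) [((1 : Int), t)] with
  | nil =>
      exfalso
      -- a foldl of insertBy starting from a nonempty list is never empty
      have hne : ∀ (ll : List (Int × Int)) (acc : List (Int × Int)), acc ≠ [] →
          ll.foldl (fun acc x => PySem.List.insertBy
            (fun a b : Int × Int => decide (-a.2 < -b.2) || !decide (-b.2 < -a.2) && decide (a.1 < b.1))
            x acc) acc ≠ [] := by
        intro ll
        induction ll with
        | nil => intro acc h; exact h
        | cons x xs ihl =>
            intro acc hacc
            simp only [List.foldl_cons]
            apply ihl
            cases acc with
            | nil => exact absurd rfl hacc
            | cons a as =>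
                simp only [PySem.List.insertBy]
                split <;> simp
      exact hne (PySem.List.enumerate rest 2) [((1 : Int), t)] (by simp) hres
  | cons p ps =>
      have : p = ((PySem.List.enumerate rest 2).foldl
          (fun (m : Int × Int) x =>
            if (decide (-x.2 < -m.2) || !decide (-m.2 < -x.2) && decide (x.1 < m.1)) = true
            then x else m) ((1 : Int), t)) := by
        have h1 := hhead
        rw [hres] at h1
        simp only [List.headD_cons] at h1
        rw [← h1]
      rw [hfold] at this
      by_cases hlt : t < rest.foldl max t
      · rw [if_pos hlt] at this
        rw [if_pos hlt, this]
      · rw [if_neg hlt] at this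
        rw [if_neg hlt, this]

-- A's whole computation on the totals list t :: rest
lemma a_char (list : String) (t : Int) (rest : List Int)
    (h : (PySem.Chars.splitOn list.toList ['\n', '\n']).map elf_total = t :: rest) :
    max_calorie_elf list
    = (if 0 < rest.foldl max t
        then [(((PySem.List.index? (t :: rest) (rest.foldl max t)).getD 0 : Nat) : Int) + 1,
              rest.foldl max t]
        else [0, 0]) := by
  unfold max_calorie_elf
  simp only []
  rw [enumerate_map_foldl]
  have hmapeq : (PySem.Chars.splitOn list.toList ['\n', '\n']).map calorie_count
      = (PySem.Chars.splitOn list.toList ['\n', '\n']).map elf_total := by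
    simp [calorie_count_eq]
  rw [hmapeq, h, loop_spec rest t 0 0 0]
  by_cases hlt : (0 : Int) < rest.foldl max t
  · rw [if_pos hlt, if_pos hlt]; simp
  · rw [if_neg hlt, if_neg hlt]

-- splitting never yields the empty list of blocks
lemma splitOn_go_ne_nil (sep : List Char) : ∀ (fuel : Nat) (l cur : List Char)
    (acc : List (List Char)), PySem.Chars.splitOn.go sep fuel l cur acc ≠ [] := by
  intro fuel
  induction fuel with
  | zero => intro l cur acc; simp [PySem.Chars.splitOn.go]
  | succ n ih =>
      intro l cur acc
      cases l with
      | nil => simp [PySem.Chars.splitOn.go]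
      | cons c rest =>
          rw [PySem.Chars.splitOn.go]
          split
          · exact ih _ _ _
          · exact ih _ _ _

lemma split_totals_ne_nil (list : String) :
    (PySem.Chars.splitOn list.toList ['\n', '\n']).map elf_total ≠ [] := by
  simp only [ne_eq, List.map_eq_nil_iff]
  exact splitOn_go_ne_nil _ _ _ _ _

-- the index? of the running max into t :: rest (with t ≤ max) steps off the head iff t < max
lemma index?_head_shift (t : Int) (rest : List Int) (h : t < rest.foldl max t) :
    PySem.List.index? (t :: rest) (rest.foldl max t)
    = (PySem.List.index? rest (rest.foldl max t)).map (· + 1) := by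
  rw [PySem.List.index?_cons_of_ne _ (ne_of_lt h)]

-- ===== VERDICT (by name: the statement is the Claim_ definition above) =====
theorem max_calorie_elf_spec : Claim_unchanged_max_calorie_elf := by
  intro list _ _ hD
  cases htot : (PySem.Chars.splitOn list.toList ['\n', '\n']).map elf_total with
  | nil => exact absurd htot (split_totals_ne_nil list)
  | cons t rest =>
      rw [a_char list t rest htot, alt_char list t rest htot]
      -- ¬ D_ means some block total is positive, so the max is positive
      have hpos : 0 < rest.foldl max t := by
        unfold D_max_calorie_elf at hD
        push_neg at hD
        obtain ⟨b, hb, hbpos⟩ := hD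
        rw [foldr_total_eq] at hbpos
        have hmem : elf_total b ∈ t :: rest := by
          rw [← htot]; exact List.mem_map_of_mem hb
        have hle : elf_total b ≤ rest.foldl max t := by
          rcases List.mem_cons.mp hmem with h | h
          · exact h ▸ (PySem.List.le_foldl_max rest t).1
          · exact (PySem.List.le_foldl_max rest t).2 _ h
        calc (0 : Int) < elf_total b := hbpos
          _ ≤ _ := hle
      rw [if_pos hpos]
      by_cases hlt : t < rest.foldl max t
      · rw [if_pos hlt, index?_head_shift t rest hlt]
        obtain ⟨n, hn⟩ : ∃ n, PySem.List.index? rest (rest.foldl max t) = some n := by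
          rw [← Option.isSome_iff_exists, PySem.List.index?_isSome_iff]
          rcases List.mem_cons.mp (foldl_max_mem rest t) with h | h
          · exact absurd h.symm (ne_of_lt hlt)
          · exact h
        rw [hn]
        simp only [Option.map_some, Option.getD_some, List.cons.injEq, and_true]
        push_cast; ring_nf
      · have hmax : rest.foldl max t = t := by
          have := (PySem.List.le_foldl_max rest t).1
          omega
        rw [if_neg hlt, hmax, PySem.List.index?_cons_self]
        simp

theorem max_calorie_elf_changed : Claim_changed_max_calorie_elf := by
  unfold Claim_changed_max_calorie_elf; decide

theorem max_calorie_elf_tight : Claim_exact_max_calorie_elf := by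
  intro list _ _ hD
  cases htot : (PySem.Chars.splitOn list.toList ['\n', '\n']).map elf_total with
  | nil => exact absurd htot (split_totals_ne_nil list)
  | cons t rest =>
      rw [a_char list t rest htot, alt_char list t rest htot]
      -- every total is ≤ 0, so the max is ≤ 0 and A reports [0, 0]
      have hnp : ¬ 0 < rest.foldl max t := by
        unfold D_max_calorie_elf at hD
        have hall : ∀ x ∈ t :: rest, x ≤ 0 := by
          intro x hx
          rw [← htot] at hx
          obtain ⟨b, hb, rfl⟩ := List.mem_map.mp hx
          have := hD b hb
          rwa [foldr_total_eq] at this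
        have := hall _ (foldl_max_mem rest t)
        omega
      rw [if_neg hnp]
      by_cases hlt : t < rest.foldl max t
      · rw [if_pos hlt]
        intro h
        have := List.head_eq_of_cons_eq h
        omega
      · rw [if_neg hlt]
        intro h
        have := List.head_eq_of_cons_eq h
        omega
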